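-- pv_equiv track=rewrite | github.com/kyuleeee/Baekjoon | 13424.py | find_best_meeting_room
-- ===== SOURCE A (Python) =====
-- import heapq
--
-- def dijkstra(start, graph, n):
--     INF = float('inf')
--     dist = [INF] * (n + 1) #만들고
--     dist[start] = 0 #일단 0으로 만들어버리고!
--     pq = [(0, start)]
--
--     while pq:
--         current_dist, current_node = heapq.heappop(pq)
--
--         if current_dist > dist[current_node]:
--             continue
--
--         for neighbor, weight in graph[current_node]:
--             distance = current_dist + weight
--             if distance < dist[neighbor]:
--                 dist[neighbor] = distance
--                 heapq.heappush(pq, (distance, neighbor))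
--
--     return dist
--
-- def find_best_meeting_room(n, m, edges, k, friends):
--     graph = {i: [] for i in range(1, n + 1)}
--
--     for a, b, c in edges:
--         graph[a].append((b, c))
--         graph[b].append((a, c))
--
--     all_distances = [dijkstra(i, graph, n) for i in friends]
--
--     min_total_distance = float('inf')
--     best_room = -1
--
--     for room in range(1, n + 1):
--         total_distance = sum(dist[room] for dist in all_distances)
--         if total_distance < min_total_distance:
--             min_total_distance = total_distance
--             best_room = room
--         elif total_distance == min_total_distance:
--             best_room = min(best_room, room)
--
--     return best_room
-- ===== SOURCE B (Python) =====
-- def find_best_meeting_room(n, m, edges, k, friends):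
--     INF = float('inf')
--
--     def bellman_ford(start):
--         # shortest distances from start by |V| rounds of edge relaxation
--         dist = [INF] * (n + 1)
--         dist[start] = 0
--         for _ in range(n):
--             new = dist[:]
--             for a, b, c in edges:
--                 if dist[a] + c < new[b]:
--                     new[b] = dist[a] + c
--                 if dist[b] + c < new[a]:
--                     new[a] = dist[b] + c
--             dist = new
--         return dist
--
--     all_distances = [bellman_ford(f) for f in friends]
--
--     min_total_distance = float('inf')
--     best_room = -1
--     for room in range(1, n + 1):
--         total_distance = sum(dist[room] for dist in all_distances)
--         if total_distance < min_total_distance: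
--             min_total_distance = total_distance
--             best_room = room
--     return best_room
-- ===== Notes on version B (the rewrite author's own statement) =====
-- stated objective: alternative
-- what changed: Replaces A's per-friend heapq-based Dijkstra (adjacency dict + priority queue with stale-entry skipping) by per-friend Bellman-Ford: n rounds of relaxing every undirected edge over a plain distance array, with no graph dict and no priority queue; the argmin-over-rooms scan also drops A's dead '==' tie-break branch (it can never change best_room since rooms are visited in increasing order).
-- outside the precondition, e.g. on find_best_meeting_room(3, 1, [(2, 3, -1)], 1, [1]): A returns 1, B returns 1
import Mathlib
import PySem

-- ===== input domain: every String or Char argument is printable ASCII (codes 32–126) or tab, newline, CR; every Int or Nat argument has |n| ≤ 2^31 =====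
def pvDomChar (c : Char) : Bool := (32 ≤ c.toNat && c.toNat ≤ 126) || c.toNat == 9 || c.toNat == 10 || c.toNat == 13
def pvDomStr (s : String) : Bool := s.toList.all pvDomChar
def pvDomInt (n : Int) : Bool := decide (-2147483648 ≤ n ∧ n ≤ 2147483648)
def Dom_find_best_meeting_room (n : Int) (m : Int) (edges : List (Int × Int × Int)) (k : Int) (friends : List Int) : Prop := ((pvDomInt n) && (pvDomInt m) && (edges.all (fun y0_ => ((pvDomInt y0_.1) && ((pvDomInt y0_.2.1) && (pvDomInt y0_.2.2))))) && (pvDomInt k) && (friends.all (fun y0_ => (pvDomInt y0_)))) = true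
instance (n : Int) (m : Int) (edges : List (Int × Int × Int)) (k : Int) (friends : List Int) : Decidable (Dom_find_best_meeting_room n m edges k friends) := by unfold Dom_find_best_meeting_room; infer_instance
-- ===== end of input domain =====

-- B replaces A's per-friend heapq Dijkstra by per-friend Bellman–Ford edge-relaxation rounds
-- (no priority queue at all); the equivalence proved is about the return value only.

-- ===== PORT A =====
-- Distances are Python ints or float('inf'): modelled as Option Int, none = inf (helpers shared by both ports).
def oadd : Option Int → Int → Option Int
  | none, _ => none
  | some a, c => some (a + c)

def oaddO : Option Int → Option Int → Option Int
  | none, _ => none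
  | some _, none => none
  | some a, some b => some (a + b)

def olt : Option Int → Option Int → Bool
  | none, _ => false
  | some _, none => true
  | some a, some b => decide (a < b)

def oeq : Option Int → Option Int → Bool
  | none, none => true
  | some a, some b => decide (a = b)
  | _, _ => false

-- Python list read/write dist[i], including negative-index wraparound; exact for -len ≤ i < len
-- (outside that range Python raises IndexError, which happens only where the program as a whole raises).
def pyi (L : Nat) (i : Int) : Nat := (if i < 0 then i + (L : Int) else i).toNat
def dget (l : List (Option Int)) (i : Int) : Option Int := l.getD (pyi l.length i) none
def dset (l : List (Option Int)) (i : Int) (x : Option Int) : List (Option Int) := l.set (pyi l.length i) x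

-- heapq modelled as a list kept sorted by Python's lexicographic pair order: heappush/heappop-min/
-- emptiness (the only heap operations A performs) are observationally exact.
def hpush (x : Int × Int) (h : List (Int × Int)) : List (Int × Int) :=
  PySem.List.insertBy (fun a b => decide (a.1 < b.1 ∨ (a.1 = b.1 ∧ a.2 < b.2))) x h

-- graph = {i: [] for i in range(1, n+1)} then graph[a].append((b,c)); graph[b].append((a,c))
-- (Dict.modify with default []: exact when endpoints lie in 1..n, i.e. under Pre_; Python raises KeyError otherwise).
def buildGraph (n : Int) (edges : List (Int × Int × Int)) : PySem.Dict Int (List (Int × Int)) :=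
  edges.foldl
    (fun g e => (g.modify e.1 [] (· ++ [(e.2.1, e.2.2)])).modify e.2.1 [] (· ++ [(e.1, e.2.2)]))
    ((PySem.List.pyRange 1 (n+1) 1).foldl (fun g i => g.insert i ([] : List (Int × Int))) PySem.Dict.empty)

def esum (edges : List (Int × Int × Int)) : Int := (edges.map (fun e => e.2.2)).sum

-- totality fuel for the while-loop (proved sufficient under Pre_; Python's loop can diverge on negative weights)
def dijFuel (n : Int) (edges : List (Int × Int × Int)) : Nat :=
  (n + 1).toNat * ((n * esum edges).toNat + 2) + 2

def dijLoop (g : PySem.Dict Int (List (Int × Int))) :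
    Nat → List (Option Int) → List (Int × Int) → List (Option Int)
  | 0, dist, _ => dist
  | _ + 1, dist, [] => dist
  | fuel + 1, dist, (d, u) :: tail =>
      if olt (dget dist u) (some d) then dijLoop g fuel dist tail
      else
        let st := (g.getD u []).foldl
          (fun st nb =>
            if olt (some (d + nb.2)) (dget st.1 nb.1)
            then (dset st.1 nb.1 (some (d + nb.2)), hpush (d + nb.2, nb.1) st.2)
            else st) (dist, tail)
        dijLoop g fuel st.1 st.2

def dijkstra (n : Int) (edges : List (Int × Int × Int)) (g : PySem.Dict Int (List (Int × Int)))
    (start : Int) : List (Option Int) :=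
  dijLoop g (dijFuel n edges) (dset (List.replicate (n + 1).toNat none) start (some 0)) [(0, start)]

def find_best_meeting_room (n : Int) (m : Int) (edges : List (Int × Int × Int)) (k : Int)
    (friends : List Int) : Int :=
  let g := buildGraph n edges
  let all := friends.map (fun f => dijkstra n edges g f)
  ((PySem.List.pyRange 1 (n + 1) 1).foldl
    (fun (st : Option Int × Int) room =>
      let total := all.foldl (fun acc dv => oaddO acc (dget dv room)) (some 0)
      if olt total st.1 then (total, room)
      else if oeq total st.1 then (st.1, min st.2 room)
      else st)
    (none, -1)).2

-- ===== PORT B =====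
def bfRound (edges : List (Int × Int × Int)) (dist : List (Option Int)) : List (Option Int) :=
  edges.foldl
    (fun nd e =>
      let nd1 := if olt (oadd (dget dist e.1) e.2.2) (dget nd e.2.1)
                 then dset nd e.2.1 (oadd (dget dist e.1) e.2.2) else nd
      if olt (oadd (dget dist e.2.1) e.2.2) (dget nd1 e.1)
      then dset nd1 e.1 (oadd (dget dist e.2.1) e.2.2) else nd1)
    dist

def bfIter (edges : List (Int × Int × Int)) : Nat → List (Option Int) → List (Option Int)
  | 0, dist => dist
  | t + 1, dist => bfRound edges (bfIter edges t dist)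

def bellmanFord (n : Int) (edges : List (Int × Int × Int)) (start : Int) : List (Option Int) :=
  bfIter edges n.toNat (dset (List.replicate (n + 1).toNat none) start (some 0))

def find_best_meeting_room_alt (n : Int) (m : Int) (edges : List (Int × Int × Int)) (k : Int)
    (friends : List Int) : Int :=
  let all := friends.map (fun f => bellmanFord n edges f)
  ((PySem.List.pyRange 1 (n + 1) 1).foldl
    (fun (st : Option Int × Int) room =>
      let total := all.foldl (fun acc dv => oaddO acc (dget dv room)) (some 0)
      if olt total st.1 then (total, room)
      else st)
    (none, -1)).2

-- ===== PRECONDITION & SPEC =====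
-- Pre_ excludes inputs on which A raises (edge endpoints or friends outside 1..n: KeyError/IndexError)
-- and negative edge weights, on which A's Dijkstra loops forever whenever such an edge is reachable
-- from a friend (where an unreachable negative edge lets A return, B returns the same value).
def Pre_find_best_meeting_room (n : Int) (m : Int) (edges : List (Int × Int × Int)) (k : Int)
    (friends : List Int) : Prop :=
  (∀ e ∈ edges, 1 ≤ e.1 ∧ e.1 ≤ n ∧ 1 ≤ e.2.1 ∧ e.2.1 ≤ n ∧ 0 ≤ e.2.2) ∧
  (∀ f ∈ friends, 1 ≤ f ∧ f ≤ n)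

instance (n : Int) (m : Int) (edges : List (Int × Int × Int)) (k : Int) (friends : List Int) :
    Decidable (Pre_find_best_meeting_room n m edges k friends) := by
  unfold Pre_find_best_meeting_room; infer_instance

def pvWitness_find_best_meeting_room : Int × Int × (List (Int × Int × Int)) × Int × List Int :=
  (3, 2, [(1, 2, 3), (2, 3, 1)], 2, [1, 3])

def Spec_find_best_meeting_room (n : Int) (m : Int) (edges : List (Int × Int × Int)) (k : Int)
    (friends : List Int) (out : Int) : Prop := out = find_best_meeting_room_alt n m edges k friends
instance (n : Int) (m : Int) (edges : List (Int × Int × Int)) (k : Int) (friends : List Int) (out : Int) : Decidable (Spec_find_best_meeting_room n m edges k friends out) := by unfold Spec_find_best_meeting_room; infer_instance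

-- ===== CLAIM (what is proved, stated in full; the proofs are below) =====
def Claim_equal_find_best_meeting_room : Prop := ∀ (n : Int) (m : Int) (edges : List (Int × Int × Int)) (k : Int) (friends : List Int), Dom_find_best_meeting_room n m edges k friends → Pre_find_best_meeting_room n m edges k friends → Spec_find_best_meeting_room n m edges k friends (find_best_meeting_room n m edges k friends)

-- ===== LEMMAS AND PROOFS =====


-- edge-list sanity from Pre_: endpoints in 1..n, weights nonnegative
def EOK (n : Int) (edges : List (Int × Int × Int)) : Prop :=
  ∀ e ∈ edges, 1 ≤ e.1 ∧ e.1 ≤ n ∧ 1 ≤ e.2.1 ∧ e.2.1 ≤ n ∧ 0 ≤ e.2.2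

-- one undirected step of the graph
def Step (edges : List (Int × Int × Int)) (u v c : Int) : Prop :=
  (u, v, c) ∈ edges ∨ (v, u, c) ∈ edges

def IsWalk (edges : List (Int × Int × Int)) : Int → List (Int × Int) → Int → Prop
  | s, [], t => t = s
  | s, (w, c) :: P, t => Step edges s w c ∧ IsWalk edges w P t

def wsum (P : List (Int × Int)) : Int := (P.map (fun p => p.2)).sum

def endp (s : Int) (Q : List (Int × Int)) : Int := ((Q.getLast?).map Prod.fst).getD s

def opLE (x y : Option Int) : Prop := ∀ b, y = some b → ∃ a, x = some a ∧ a ≤ b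

lemma opLE_refl (x : Option Int) : opLE x x := fun b hb => ⟨b, hb, le_refl b⟩

lemma opLE_trans {x y z : Option Int} (h1 : opLE x y) (h2 : opLE y z) : opLE x z := by
  intro b hb
  obtain ⟨a, ha, hab⟩ := h2 b hb
  obtain ⟨a', ha', h'⟩ := h1 a ha
  exact ⟨a', ha', le_trans h' hab⟩

lemma step_bounds {n : Int} {edges : List (Int × Int × Int)} (hE : EOK n edges)
    {u v c : Int} (h : Step edges u v c) :
    (1 ≤ u ∧ u ≤ n) ∧ (1 ≤ v ∧ v ≤ n) ∧ 0 ≤ c := by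
  rcases h with h | h <;> have := hE _ h <;> simp_all

lemma esum_nonneg {n : Int} {edges : List (Int × Int × Int)} (hE : EOK n edges) :
    0 ≤ esum edges := by
  apply List.sum_nonneg
  intro x hx
  simp only [List.mem_map] at hx
  obtain ⟨e, he, rfl⟩ := hx
  exact (hE e he).2.2.2.2

lemma step_wle {n : Int} {edges : List (Int × Int × Int)} (hE : EOK n edges)
    {u v c : Int} (h : Step edges u v c) : c ≤ esum edges := by
  have hmem : c ∈ edges.map (fun e => e.2.2) := by
    rcases h with h | h <;> exact List.mem_map.mpr ⟨_, h, rfl⟩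
  exact List.single_le_sum (fun x hx => by
    simp only [List.mem_map] at hx
    obtain ⟨e, he, rfl⟩ := hx
    exact (hE e he).2.2.2.2) c hmem

lemma wsum_nil : wsum [] = 0 := rfl

lemma wsum_cons (p : Int × Int) (P : List (Int × Int)) : wsum (p :: P) = p.2 + wsum P := by
  simp [wsum]

lemma wsum_append (P Q : List (Int × Int)) : wsum (P ++ Q) = wsum P + wsum Q := by
  simp [wsum]

lemma wsum_nonneg {P : List (Int × Int)} (h : ∀ p ∈ P, 0 ≤ p.2) : 0 ≤ wsum P := by
  apply List.sum_nonneg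
  intro x hx
  simp only [List.mem_map] at hx
  obtain ⟨p, hp, rfl⟩ := hx
  exact h p hp

lemma wsum_le {P : List (Int × Int)} {W : Int} (hW : 0 ≤ W) (h : ∀ p ∈ P, p.2 ≤ W) :
    wsum P ≤ (P.length : Int) * W := by
  induction P with
  | nil => simp [wsum]
  | cons p P ih =>
      have := ih (fun q hq => h q (List.mem_cons_of_mem _ hq))
      have hp := h p (List.mem_cons_self)
      rw [wsum_cons]
      simp only [List.length_cons]
      push_cast
      nlinarith

lemma isWalk_snoc_intro {edges : List (Int × Int × Int)} {s u v c : Int}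
    {P : List (Int × Int)} (hw : IsWalk edges s P u) (hst : Step edges u v c) :
    IsWalk edges s (P ++ [(v, c)]) v := by
  induction P generalizing s with
  | nil => exact ⟨by rwa [hw] at hst, rfl⟩
  | cons p P ih =>
      obtain ⟨h1, h2⟩ := hw
      exact ⟨h1, ih h2⟩

lemma isWalk_snoc_elim {edges : List (Int × Int × Int)} {s v c t : Int}
    {P : List (Int × Int)} (hw : IsWalk edges s (P ++ [(v, c)]) t) :
    t = v ∧ ∃ u, IsWalk edges s P u ∧ Step edges u v c := by
  induction P generalizing s with
  | nil => exact ⟨hw.2, s, rfl, hw.1⟩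
  | cons p P ih =>
      obtain ⟨h1, h2⟩ := hw
      obtain ⟨ht, u, hu, hstep⟩ := ih h2
      exact ⟨ht, u, ⟨h1, hu⟩, hstep⟩

lemma isWalk_bounds {n : Int} {edges : List (Int × Int × Int)} (hE : EOK n edges)
    {s v : Int} {P : List (Int × Int)} (hw : IsWalk edges s P v) (hs : 1 ≤ s ∧ s ≤ n) :
    (1 ≤ v ∧ v ≤ n) ∧ ∀ p ∈ P, (1 ≤ p.1 ∧ p.1 ≤ n) ∧ 0 ≤ p.2 := by
  induction P generalizing s with
  | nil => exact ⟨by rw [hw]; exact hs, by simp⟩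
  | cons p P ih =>
      obtain ⟨h1, h2⟩ := hw
      have hb := step_bounds hE h1
      obtain ⟨hv, hall⟩ := ih h2 hb.2.1
      refine ⟨hv, ?_⟩
      intro q hq
      rcases List.mem_cons.mp hq with rfl | hq
      · exact ⟨hb.2.1, hb.2.2⟩
      · exact hall q hq

-- dget / dset
lemma length_dset (l : List (Option Int)) (i : Int) (x : Option Int) :
    (dset l i x).length = l.length := by simp [dset]

lemma pyi_nonneg {L : Nat} {i : Int} (h : 0 ≤ i) : pyi L i = i.toNat := by
  unfold pyi
  rw [if_neg (by omega)]

lemma dget_dset_phys_self {l : List (Option Int)} {i : Int} (h : pyi l.length i < l.length)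
    (x : Option Int) : dget (dset l i x) i = x := by
  simp [dget, dset, List.getD, List.getElem?_set_self h]

lemma dget_dset_phys_ne {l : List (Option Int)} {i j : Int}
    (h : pyi l.length i ≠ pyi l.length j) (x : Option Int) :
    dget (dset l i x) j = dget l j := by
  simp [dget, dset, List.getD, List.getElem?_set_ne h]

lemma dget_congr_phys {l : List (Option Int)} {i j : Int} (h : pyi l.length i = pyi l.length j) :
    dget l i = dget l j := by simp [dget, List.getD, h]

lemma dget_dset_self {l : List (Option Int)} {i : Int} (h0 : 0 ≤ i) (hl : i.toNat < l.length)
    (x : Option Int) : dget (dset l i x) i = x :=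
  dget_dset_phys_self (by rw [pyi_nonneg h0]; exact hl) x

lemma dget_replicate (L : Nat) (i : Int) : dget (List.replicate L (none : Option Int)) i = none := by
  simp only [dget, List.getD, List.getElem?_replicate]
  split <;> simp

-- graph characterization
def gpairs (edges : List (Int × Int × Int)) : List (Int × (Int × Int)) :=
  edges.flatMap fun e => [(e.1, (e.2.1, e.2.2)), (e.2.1, (e.1, e.2.2))]

lemma graphInit_getD (l : List Int) (g : PySem.Dict Int (List (Int × Int)))
    (h : ∀ v, g.getD v [] = []) (v : Int) :
    (l.foldl (fun g i => g.insert i ([] : List (Int × Int))) g).getD v [] = [] := by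
  induction l generalizing g with
  | nil => exact h v
  | cons i l ih =>
      refine ih _ (fun w => ?_)
      rw [PySem.Dict.getD_insert]
      split <;> simp [h]

lemma buildGraph_double (l : List (Int × Int × Int)) (g : PySem.Dict Int (List (Int × Int))) :
    l.foldl (fun g e => (g.modify e.1 [] (· ++ [(e.2.1, e.2.2)])).modify e.2.1 [] (· ++ [(e.1, e.2.2)])) g
      = (l.flatMap fun e => [(e.1, (e.2.1, e.2.2)), (e.2.1, (e.1, e.2.2))]).foldl
          (fun g p => g.modify p.1 [] (· ++ [p.2])) g := by
  induction l generalizing g with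
  | nil => rfl
  | cons e l ih => simp [List.flatMap_cons, ih]

lemma buildGraph_getD (n : Int) (edges : List (Int × Int × Int)) (v : Int) :
    (buildGraph n edges).getD v [] =
      ((gpairs edges).filter (fun p => p.1 == v)).map Prod.snd := by
  unfold buildGraph gpairs
  rw [buildGraph_double, PySem.Dict.getD_foldl_modify_append]
  rw [graphInit_getD _ _ (fun v => PySem.Dict.getD_empty v [])]
  simp

lemma mem_graph {n : Int} (edges : List (Int × Int × Int)) (u w c : Int) :
    (w, c) ∈ (buildGraph n edges).getD u [] ↔ Step edges u w c := by
  rw [buildGraph_getD]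
  simp only [List.mem_map, List.mem_filter, gpairs, List.mem_flatMap, Step]
  constructor
  · rintro ⟨⟨a, p⟩, ⟨⟨e, he, hmem⟩, hbeq⟩, rfl⟩
    simp only [List.mem_cons] at hmem
    have ha : a = u := by simpa using hbeq
    rcases hmem with h | h | h
    · left; cases h; subst ha; exact he
    · right; cases h; subst ha; exact he
    · simp at h
  · rintro (h | h)
    · exact ⟨(u, (w, c)), ⟨⟨_, h, by simp⟩, by simp⟩, rfl⟩
    · exact ⟨(u, (w, c)), ⟨⟨_, h, by simp⟩, by simp⟩, rfl⟩


lemma opLE_none_right (x : Option Int) : opLE x none := by intro b hb; cases hb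

lemma opLE_of_olt_false {x y : Option Int} (h : olt x y = false) : opLE y x := by
  cases x with
  | none => exact opLE_none_right y
  | some a =>
      cases y with
      | none => simp [olt] at h
      | some b' =>
          intro b hb
          obtain rfl : a = b := by injection hb
          simp [olt] at h
          exact ⟨b', rfl, h⟩

lemma olt_true_some {x : Option Int} {t b : Int} (h : olt (some t) x = true)
    (hb : x = some b) : t < b := by subst hb; simpa [olt] using h

lemma dget_dset_toNat_ne {l : List (Option Int)} {i j : Int} (h0 : 0 ≤ i) (h0' : 0 ≤ j)
    (h : i.toNat ≠ j.toNat) (x : Option Int) : dget (dset l i x) j = dget l j :=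
  dget_dset_phys_ne (by rw [pyi_nonneg h0, pyi_nonneg h0']; exact h) x

lemma dget_congr_toNat {l : List (Option Int)} {i j : Int} (h0 : 0 ≤ i) (h0' : 0 ≤ j)
    (h : i.toNat = j.toNat) : dget l i = dget l j :=
  dget_congr_phys (by rw [pyi_nonneg h0, pyi_nonneg h0']; exact h)

lemma dget_some_lt_length {l : List (Option Int)} {i : Int} {x : Int}
    (h : dget l i = some x) : pyi l.length i < l.length := by
  by_contra hc
  rw [dget, List.getD, List.getElem?_eq_none (by omega : l.length ≤ pyi l.length i)] at h
  cases h

lemma dset_olt_mono {m : List (Option Int)} {j : Int} {w : Option Int}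
    (hw : olt w (dget m j) = true) : ∀ i, opLE (dget (dset m j w) i) (dget m i) := by
  intro i
  by_cases hij : pyi m.length i = pyi m.length j
  · have e1 : dget (dset m j w) i = dget (dset m j w) j :=
      dget_congr_phys (by rw [length_dset]; exact hij)
    have e2 : dget m i = dget m j := dget_congr_phys hij
    rw [e1, e2]
    intro b hb
    have hj : pyi m.length j < m.length := dget_some_lt_length hb
    rw [dget_dset_phys_self hj]
    cases w with
    | none => simp [olt] at hw
    | some a => exact ⟨a, rfl, le_of_lt (olt_true_some hw hb)⟩
  · rw [dget_dset_phys_ne (fun hc => hij hc.symm) w]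
    exact opLE_refl _

-- relaxation fixed point
def FP (edges : List (Int × Int × Int)) (s : Int) (dist : List (Option Int)) : Prop :=
  dget dist s = some 0 ∧
  ∀ u v c, Step edges u v c → ∀ x, dget dist u = some x → ∃ y, dget dist v = some y ∧ y ≤ x + c

lemma fp_walk {edges : List (Int × Int × Int)} {s : Int} {dist : List (Option Int)}
    (hFP : FP edges s dist) :
    ∀ (P : List (Int × Int)) (start v z : Int), dget dist start = some z →
      IsWalk edges start P v → ∃ x, dget dist v = some x ∧ x ≤ z + wsum P := by
  intro P
  induction P with
  | nil => intro start v z hz hw; rw [hw]; exact ⟨z, hz, by simp [wsum]⟩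
  | cons p P ih =>
      rintro start v z hz ⟨hstep, hw⟩
      obtain ⟨y, hy, hyle⟩ := hFP.2 _ _ _ hstep _ hz
      obtain ⟨x, hx, hxle⟩ := ih p.1 v y hy hw
      refine ⟨x, hx, ?_⟩
      rw [wsum_cons]
      omega

-- one Bellman–Ford round, characterized through the fold over the edge list
lemma bfRound_fold {n : Int} {edges : List (Int × Int × Int)} (hE : EOK n edges)
    (edges' : List (Int × Int × Int)) (hsub : ∀ e ∈ edges', e ∈ edges)
    (dist : List (Option Int)) (hL : dist.length = (n + 1).toNat) :
    ∀ nd, nd.length = dist.length →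
      (∀ v x, 1 ≤ v → v ≤ n → dget nd v = some x →
        dget dist v = some x ∨ ∃ u c, Step edges u v c ∧ ∃ y, dget dist u = some y ∧ x = y + c) →
      (let r := edges'.foldl
          (fun nd e =>
            let nd1 := if olt (oadd (dget dist e.1) e.2.2) (dget nd e.2.1)
                       then dset nd e.2.1 (oadd (dget dist e.1) e.2.2) else nd
            if olt (oadd (dget dist e.2.1) e.2.2) (dget nd1 e.1)
            then dset nd1 e.1 (oadd (dget dist e.2.1) e.2.2) else nd1) nd
       r.length = dist.length ∧
       (∀ i, opLE (dget r i) (dget nd i)) ∧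
       (∀ v x, 1 ≤ v → v ≤ n → dget r v = some x →
         dget dist v = some x ∨ ∃ u c, Step edges u v c ∧ ∃ y, dget dist u = some y ∧ x = y + c) ∧
       (∀ e ∈ edges', opLE (dget r e.2.1) (oadd (dget dist e.1) e.2.2) ∧
                      opLE (dget r e.1) (oadd (dget dist e.2.1) e.2.2))) := by
  induction edges' with
  | nil =>
      intro nd h1 h3
      exact ⟨h1, fun i => opLE_refl _, h3, by simp⟩
  | cons e rest ih =>
      intro nd hlen hlo
      have he : e ∈ edges := hsub e List.mem_cons_self
      have hb := hE e he
      have hb1 : (e.1).toNat < nd.length := by rw [hlen, hL]; omega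
      have hb2 : (e.2.1).toNat < nd.length := by rw [hlen, hL]; omega
      set w1 := oadd (dget dist e.1) e.2.2 with hw1
      set nd1 := if olt w1 (dget nd e.2.1) then dset nd e.2.1 w1 else nd with hnd1
      set w2 := oadd (dget dist e.2.1) e.2.2 with hw2
      set nd2 := if olt w2 (dget nd1 e.1) then dset nd1 e.1 w2 else nd1 with hnd2
      have hlen1 : nd1.length = nd.length := by rw [hnd1]; split <;> simp [length_dset]
      have hlen2 : nd2.length = nd.length := by rw [hnd2]; split <;> simp [length_dset, hlen1]
      have hmono1 : ∀ i, opLE (dget nd1 i) (dget nd i) := by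
        rw [hnd1]; split
        · exact dset_olt_mono (by assumption)
        · exact fun i => opLE_refl _
      have hmono2 : ∀ i, opLE (dget nd2 i) (dget nd1 i) := by
        rw [hnd2]; split
        · exact dset_olt_mono (by assumption)
        · exact fun i => opLE_refl _
      have hmono12 : ∀ i, opLE (dget nd2 i) (dget nd i) :=
        fun i => opLE_trans (hmono2 i) (hmono1 i)
      -- where a new value can come from
      have hcase1 : ∀ v x, 1 ≤ v → v ≤ n → dget nd1 v = some x →
          dget nd v = some x ∨ (v = e.2.1 ∧ some x = w1) := by
        intro v x hv1 hv2 hx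
        rw [hnd1] at hx; revert hx; split
        · intro hx
          by_cases hv : v = e.2.1
          · subst hv
            rw [dget_dset_self (by omega) hb2] at hx
            exact Or.inr ⟨rfl, hx.symm⟩
          · left
            rwa [dget_dset_toNat_ne (by omega) (by omega) (by omega) w1] at hx
        · exact fun hx => Or.inl hx
      have hcase2 : ∀ v x, 1 ≤ v → v ≤ n → dget nd2 v = some x →
          dget nd1 v = some x ∨ (v = e.1 ∧ some x = w2) := by
        intro v x hv1 hv2 hx
        rw [hnd2] at hx; revert hx; split
        · intro hx
          by_cases hv : v = e.1
          · subst hv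
            rw [dget_dset_self (by omega) (by rw [hlen1]; exact hb1)] at hx
            exact Or.inr ⟨rfl, hx.symm⟩
          · left
            rwa [dget_dset_toNat_ne (by omega) (by omega) (by omega) w2] at hx
        · exact fun hx => Or.inl hx
      have hset_lo : ∀ v x, 1 ≤ v → v ≤ n → dget nd2 v = some x →
          dget dist v = some x ∨ ∃ u c, Step edges u v c ∧ ∃ y, dget dist u = some y ∧ x = y + c := by
        intro v x hv1 hv2 hx
        rcases hcase2 v x hv1 hv2 hx with hx1 | ⟨hvv, hval⟩
        · rcases hcase1 v x hv1 hv2 hx1 with hx0 | ⟨hvv, hval⟩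
          · exact hlo v x hv1 hv2 hx0
          · rcases hde : dget dist e.1 with _ | y
            · rw [hw1, hde] at hval; cases hval
            · rw [hw1, hde] at hval
              refine Or.inr ⟨e.1, e.2.2, ?_, y, hde, by injection hval⟩
              rw [hvv]; left; exact he
        · rcases hde : dget dist e.2.1 with _ | y
          · rw [hw2, hde] at hval; cases hval
          · rw [hw2, hde] at hval
            refine Or.inr ⟨e.2.1, e.2.2, ?_, y, hde, by injection hval⟩
            rw [hvv]; right; exact he
      -- the processed edge's upper bounds hold from nd1 / nd2 on
      have key1 : opLE (dget nd1 e.2.1) w1 := by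
        rw [hnd1]; split
        · rw [dget_dset_self (by omega) hb2]; exact opLE_refl _
        · rename_i h1
          rw [Bool.not_eq_true] at h1
          exact opLE_of_olt_false h1
      have key2 : opLE (dget nd2 e.1) w2 := by
        rw [hnd2]; split
        · rw [dget_dset_self (by omega) (by rw [hlen1]; exact hb1)]; exact opLE_refl _
        · rename_i h2
          rw [Bool.not_eq_true] at h2
          exact opLE_of_olt_false h2
      have hup1 : opLE (dget nd2 e.2.1) w1 := opLE_trans (hmono2 e.2.1) key1
      obtain ⟨r1, r2, r3, r4⟩ := ih (fun e' he' => hsub e' (List.mem_cons_of_mem _ he')) nd2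
        (hlen2.trans hlen) hset_lo
      refine ⟨r1, fun i => opLE_trans (r2 i) (hmono12 i), r3, ?_⟩
      intro e' he'
      rcases List.mem_cons.mp he' with rfl | he'
      · exact ⟨opLE_trans (r2 _) hup1, opLE_trans (r2 _) key2⟩
      · exact r4 e' he'


lemma bfRound_len (edges : List (Int × Int × Int)) (dist : List (Option Int)) :
    (bfRound edges dist).length = dist.length := by
  suffices h : ∀ (l : List (Int × Int × Int)) (nd : List (Option Int)),
      (l.foldl (fun nd e =>
        let nd1 := if olt (oadd (dget dist e.1) e.2.2) (dget nd e.2.1)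
                   then dset nd e.2.1 (oadd (dget dist e.1) e.2.2) else nd
        if olt (oadd (dget dist e.2.1) e.2.2) (dget nd1 e.1)
        then dset nd1 e.1 (oadd (dget dist e.2.1) e.2.2) else nd1) nd).length = nd.length by
    exact h edges dist
  intro l
  induction l with
  | nil => intro nd; rfl
  | cons e rest ih =>
      intro nd
      rw [List.foldl_cons, ih]
      dsimp only
      split <;> split <;> simp [length_dset]

lemma bfRound_props {n : Int} {edges : List (Int × Int × Int)} (hE : EOK n edges)
    (dist : List (Option Int)) (hL : dist.length = (n + 1).toNat) :
    (∀ i, opLE (dget (bfRound edges dist) i) (dget dist i)) ∧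
    (∀ v x, 1 ≤ v → v ≤ n → dget (bfRound edges dist) v = some x →
      dget dist v = some x ∨ ∃ u c, Step edges u v c ∧ ∃ y, dget dist u = some y ∧ x = y + c) ∧
    (∀ u v c, Step edges u v c → opLE (dget (bfRound edges dist) v) (oadd (dget dist u) c)) := by
  obtain ⟨r1, r2, r3, r4⟩ :=
    bfRound_fold hE edges (fun _ h => h) dist hL dist rfl (fun v x _ _ hx => Or.inl hx)
  refine ⟨r2, r3, ?_⟩
  intro u v c hst
  rcases hst with h | h
  · exact (r4 _ h).1
  · exact (r4 _ h).2

lemma bfIter_length (edges : List (Int × Int × Int)) (t : Nat) (d : List (Option Int)) :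
    (bfIter edges t d).length = d.length := by
  induction t with
  | zero => rfl
  | succ t ih => rw [bfIter, bfRound_len, ih]

lemma bfInit_len (n s : Int) :
    (dset (List.replicate (n + 1).toNat (none : Option Int)) s (some 0)).length = (n + 1).toNat := by
  simp [length_dset]

lemma bfInit_get_s {n s : Int} (hs : 1 ≤ s ∧ s ≤ n) :
    dget (dset (List.replicate (n + 1).toNat (none : Option Int)) s (some 0)) s = some 0 :=
  dget_dset_self (by omega) (by simp; omega) _

lemma bfInit_get_eq {n s v : Int} {x : Int} (hs : 1 ≤ s ∧ s ≤ n) (hv : 1 ≤ v ∧ v ≤ n)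
    (h : dget (dset (List.replicate (n + 1).toNat (none : Option Int)) s (some 0)) v = some x) :
    v = s ∧ x = 0 := by
  by_cases hvs : v = s
  · subst hvs
    rw [bfInit_get_s ⟨hv.1, hv.2⟩] at h
    exact ⟨rfl, by injection h with h; omega⟩
  · rw [dget_dset_toNat_ne (by omega) (by omega) (by omega) _, dget_replicate] at h
    cases h

lemma bf_upper {n : Int} {edges : List (Int × Int × Int)} (hE : EOK n edges)
    {s : Int} (hs : 1 ≤ s ∧ s ≤ n) :
    ∀ (t : Nat) (P : List (Int × Int)) (v : Int), IsWalk edges s P v → P.length ≤ t →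
      opLE (dget (bfIter edges t (dset (List.replicate (n + 1).toNat none) s (some 0))) v)
        (some (wsum P)) := by
  intro t
  induction t with
  | zero =>
      intro P v hw hl
      obtain rfl : P = [] := List.eq_nil_of_length_eq_zero (by omega)
      obtain rfl : v = s := hw
      intro b hb
      exact ⟨0, bfInit_get_s hs, by injection hb with h; simp [wsum] at h; omega⟩
  | succ t ih =>
      intro P v hw hl
      have hLt : (bfIter edges t (dset (List.replicate (n + 1).toNat none) s (some 0))).length
          = (n + 1).toNat := by rw [bfIter_length, bfInit_len]
      obtain ⟨hmono, hlo, hup⟩ := bfRound_props hE _ hLt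
      by_cases hPl : P.length ≤ t
      · exact opLE_trans (hmono v) (ih P v hw hPl)
      · rcases List.eq_nil_or_concat P with rfl | ⟨Q, last, rfl⟩
        · exact absurd (Nat.zero_le t) (by simp at hPl ⊢)
        · rcases last with ⟨a, c⟩
          rw [List.concat_eq_append] at hw hl ⊢
          obtain ⟨rfl, u, hwQ, hst⟩ := isWalk_snoc_elim hw
          have hQl : Q.length ≤ t := by simp at hl; omega
          have hQ := ih Q u hwQ hQl
          obtain ⟨y, hy, hyle⟩ := hQ (wsum Q) rfl
          intro b hb
          have hb' : b = wsum Q + c := by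
            rw [wsum_append, wsum_cons, wsum_nil] at hb; injection hb with h; omega
          obtain ⟨z, hz, hzle⟩ := hup u v c hst (y + c) (by rw [hy]; rfl)
          exact ⟨z, by rwa [bfIter], by omega⟩

lemma bf_lower {n : Int} {edges : List (Int × Int × Int)} (hE : EOK n edges)
    {s : Int} (hs : 1 ≤ s ∧ s ≤ n) :
    ∀ (t : Nat) (v x : Int), 1 ≤ v → v ≤ n →
      dget (bfIter edges t (dset (List.replicate (n + 1).toNat none) s (some 0))) v = some x →
      ∃ P, IsWalk edges s P v ∧ wsum P = x := by
  intro t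
  induction t with
  | zero =>
      intro v x hv1 hv2 h
      obtain ⟨rfl, rfl⟩ := bfInit_get_eq hs ⟨hv1, hv2⟩ h
      exact ⟨[], rfl, rfl⟩
  | succ t ih =>
      intro v x hv1 hv2 h
      have hLt : (bfIter edges t (dset (List.replicate (n + 1).toNat none) s (some 0))).length
          = (n + 1).toNat := by rw [bfIter_length, bfInit_len]
      obtain ⟨hmono, hlo, hup⟩ := bfRound_props hE _ hLt
      rw [bfIter] at h
      rcases hlo v x hv1 hv2 h with h0 | ⟨u, c, hst, y, hy, rfl⟩
      · exact ih v x hv1 hv2 h0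
      · have hub := step_bounds hE hst
        obtain ⟨Q, hwQ, rfl⟩ := ih u y hub.1.1 hub.1.2 hy
        exact ⟨Q ++ [(v, c)], isWalk_snoc_intro hwQ hst, by rw [wsum_append, wsum_cons, wsum_nil]; omega⟩

lemma opLE_antisymm {x y : Option Int} (h1 : opLE x y) (h2 : opLE y x) : x = y := by
  cases x with
  | none =>
      cases y with
      | none => rfl
      | some b => obtain ⟨a, ha, _⟩ := h1 b rfl; cases ha
  | some a =>
      cases y with
      | none => obtain ⟨b, hb, _⟩ := h2 a rfl; cases hb
      | some b =>
          obtain ⟨a', ha', h1'⟩ := h1 b rfl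
          obtain ⟨b', hb', h2'⟩ := h2 a rfl
          injection ha' with ha'; injection hb' with hb'
          subst ha'; subst hb'
          exact congrArg some (le_antisymm h1' h2')

lemma mem_hpush (x y : Int × Int) (h : List (Int × Int)) : y ∈ hpush x h ↔ y = x ∨ y ∈ h :=
  PySem.List.mem_insertBy _ _ _ _

lemma length_hpush (x : Int × Int) (h : List (Int × Int)) : (hpush x h).length = h.length + 1 := by
  unfold hpush
  induction h with
  | nil => rfl
  | cons y ys ih => simp [PySem.List.insertBy]; split <;> simp at ih ⊢ <;> omega

-- potential for the fuel argument
def phiB (M : Nat) : Option Int → Nat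
  | none => M + 1
  | some a => a.toNat

def PhiL (M : Nat) (l : List (Option Int)) : Nat := (l.map (phiB M)).sum

lemma PhiL_replicate (M L : Nat) : PhiL M (List.replicate L none) = L * (M + 1) := by
  simp [PhiL, phiB, List.sum_replicate, smul_eq_mul]

lemma PhiL_set (M : Nat) {l : List (Option Int)} : ∀ {j : Nat}, j < l.length → ∀ x,
    PhiL M (l.set j x) + phiB M (l.getD j none) = PhiL M l + phiB M x := by
  induction l with
  | nil => intro j hj; simp at hj
  | cons a l ih =>
      intro j hj x
      cases j with
      | zero => simp [PhiL, List.getD]; omega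
      | succ j =>
          have := ih (j := j) (by simpa using hj) x
          simp [PhiL, List.getD] at this ⊢
          omega

lemma PhiL_dset (M : Nat) {l : List (Option Int)} {i : Int} (h0 : 0 ≤ i)
    (hi : i.toNat < l.length) (x : Option Int) :
    PhiL M (dset l i x) + phiB M (dget l i) = PhiL M l + phiB M x := by
  unfold dset dget
  rw [pyi_nonneg h0]
  exact PhiL_set M hi x

lemma nodup_length_le {n : Int} {l : List Int} (hnd : l.Nodup)
    (h : ∀ x ∈ l, 1 ≤ x ∧ x ≤ n) : l.length ≤ n.toNat := by
  have hsub : l.toFinset ⊆ Finset.Icc (1 : Int) n := by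
    intro x hx
    exact Finset.mem_Icc.mpr (h x (List.mem_toFinset.mp hx))
  have hcard := Finset.card_le_card hsub
  rw [List.toFinset_card_of_nodup hnd, Int.card_Icc] at hcard
  omega

lemma isWalk_steps {edges : List (Int × Int × Int)} {s v : Int} {P : List (Int × Int)}
    (hw : IsWalk edges s P v) : ∀ p ∈ P, ∃ u, Step edges u p.1 p.2 := by
  induction P generalizing s with
  | nil => simp
  | cons p P ih =>
      obtain ⟨h1, h2⟩ := hw
      intro q hq
      rcases List.mem_cons.mp hq with rfl | hq
      · exact ⟨s, h1⟩
      · exact ih h2 q hq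

lemma path_wt_bounds {n : Int} {edges : List (Int × Int × Int)} (hE : EOK n edges)
    {s v : Int} (hs : 1 ≤ s ∧ s ≤ n) {P : List (Int × Int)}
    (hw : IsWalk edges s P v) (hnd : (s :: P.map Prod.fst).Nodup) :
    0 ≤ wsum P ∧ wsum P ≤ n * esum edges := by
  have hb := isWalk_bounds hE hw hs
  have h0 : 0 ≤ wsum P := wsum_nonneg (fun p hp => (hb.2 p hp).2)
  refine ⟨h0, ?_⟩
  have hlen : P.length + 1 ≤ n.toNat := by
    have hmem : ∀ x ∈ s :: P.map Prod.fst, 1 ≤ x ∧ x ≤ n := by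
      intro x hx
      rcases List.mem_cons.mp hx with rfl | hx
      · exact hs
      · obtain ⟨p, hp, rfl⟩ := List.mem_map.mp hx
        exact (hb.2 p hp).1
    have := nodup_length_le hnd hmem
    simpa using this
  have hS : 0 ≤ esum edges := esum_nonneg hE
  have hW : wsum P ≤ (P.length : Int) * esum edges := by
    refine wsum_le hS ?_
    intro p hp
    obtain ⟨u, hst⟩ := isWalk_steps hw p hp
    exact step_wle hE hst
  have hle : (P.length : Int) ≤ n - 1 := by omega
  nlinarith

-- prefix soundness of a witness path: every proper prefix endpoint already carries at most its prefix weight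
def PfxOk (s : Int) (dist : List (Option Int)) (P : List (Int × Int)) : Prop :=
  ∀ Q R, P = Q ++ R → ∃ z, dget dist (endp s Q) = some z ∧ z ≤ wsum Q

lemma endp_concat (s a c : Int) (Q : List (Int × Int)) : endp s (Q ++ [(a, c)]) = a := by
  simp [endp]

lemma endp_mem (s : Int) (Q : List (Int × Int)) : endp s Q = s ∨ endp s Q ∈ Q.map Prod.fst := by
  rcases List.eq_nil_or_concat Q with rfl | ⟨Q', p, rfl⟩
  · left; rfl
  · right
    rcases p with ⟨a, c⟩
    rw [List.concat_eq_append, endp_concat]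
    simp

lemma mem_fst_split {P : List (Int × Int)} {w s : Int} (h : w ∈ P.map Prod.fst) :
    ∃ Q R, P = Q ++ R ∧ endp s Q = w := by
  obtain ⟨p, hp, rfl⟩ := List.mem_map.mp h
  obtain ⟨l1, l2, rfl⟩ := List.append_of_mem hp
  refine ⟨l1 ++ [p], l2, by simp, ?_⟩
  rcases p with ⟨a, c⟩
  exact endp_concat s a c l1

lemma PfxOk_mono {dist dist' : List (Option Int)}
    (hm : ∀ i, opLE (dget dist' i) (dget dist i)) {s : Int} {P : List (Int × Int)}
    (h : PfxOk s dist P) : PfxOk s dist' P := by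
  intro Q R hQR
  obtain ⟨z, hz, hle⟩ := h Q R hQR
  obtain ⟨z', hz', hle'⟩ := hm _ z hz
  exact ⟨z', hz', le_trans hle' hle⟩

-- the loop invariant of A's Dijkstra
structure DInv (n s : Int) (edges : List (Int × Int × Int))
    (dist : List (Option Int)) (pq : List (Int × Int)) : Prop where
  len : dist.length = (n + 1).toNat
  zero : dget dist s = some 0
  path : ∀ v x, 1 ≤ v → v ≤ n → dget dist v = some x →
    ∃ P, IsWalk edges s P v ∧ (s :: P.map Prod.fst).Nodup ∧ wsum P = x ∧ PfxOk s dist P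
  ent : ∀ p ∈ pq, 1 ≤ p.2 ∧ p.2 ≤ n ∧ ∃ x, dget dist p.2 = some x ∧ x ≤ p.1
  wit : ∀ v x, 1 ≤ v → v ≤ n → dget dist v = some x →
    (x, v) ∈ pq ∨ ∀ w c, Step edges v w c → ∃ y, dget dist w = some y ∧ y ≤ x + c

-- the relaxation fold of one effective pop (d, u)
lemma dij_relax_fold {n s : Int} {edges : List (Int × Int × Int)} (hE : EOK n edges)
    (hs : 1 ≤ s ∧ s ≤ n) {u d : Int} (hu : 1 ≤ u ∧ u ≤ n) :
    ∀ (nbrs : List (Int × Int)), (∀ nb ∈ nbrs, Step edges u nb.1 nb.2) →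
    ∀ (dist : List (Option Int)) (pq : List (Int × Int)),
      dist.length = (n + 1).toNat →
      dget dist s = some 0 →
      (∀ v x, 1 ≤ v → v ≤ n → dget dist v = some x →
        ∃ P, IsWalk edges s P v ∧ (s :: P.map Prod.fst).Nodup ∧ wsum P = x ∧ PfxOk s dist P) →
      (∀ p ∈ pq, 1 ≤ p.2 ∧ p.2 ≤ n ∧ ∃ x, dget dist p.2 = some x ∧ x ≤ p.1) →
      (∀ v x, 1 ≤ v → v ≤ n → dget dist v = some x →
        (x, v) ∈ pq ∨ (∀ w c, Step edges v w c → ∃ y, dget dist w = some y ∧ y ≤ x + c) ∨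
        (v = u ∧ x = d)) →
      dget dist u = some d →
      (let st := nbrs.foldl
          (fun st nb =>
            if olt (some (d + nb.2)) (dget st.1 nb.1)
            then (dset st.1 nb.1 (some (d + nb.2)), hpush (d + nb.2, nb.1) st.2)
            else st) (dist, pq)
       st.1.length = (n + 1).toNat ∧
       dget st.1 s = some 0 ∧
       (∀ v x, 1 ≤ v → v ≤ n → dget st.1 v = some x →
         ∃ P, IsWalk edges s P v ∧ (s :: P.map Prod.fst).Nodup ∧ wsum P = x ∧ PfxOk s st.1 P) ∧
       (∀ p ∈ st.2, 1 ≤ p.2 ∧ p.2 ≤ n ∧ ∃ x, dget st.1 p.2 = some x ∧ x ≤ p.1) ∧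
       (∀ v x, 1 ≤ v → v ≤ n → dget st.1 v = some x →
         (x, v) ∈ st.2 ∨ (∀ w c, Step edges v w c → ∃ y, dget st.1 w = some y ∧ y ≤ x + c) ∨
         (v = u ∧ x = d)) ∧
       (∀ nb ∈ nbrs, ∃ y, dget st.1 nb.1 = some y ∧ y ≤ d + nb.2) ∧
       dget st.1 u = some d ∧
       (∀ i, opLE (dget st.1 i) (dget dist i)) ∧
       PhiL (n * esum edges).toNat st.1 + st.2.length ≤
         PhiL (n * esum edges).toNat dist + pq.length) := by
  intro nbrs
  induction nbrs with
  | nil =>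
      intro _ dist pq h1 h2 h3 h4 h5 h6
      exact ⟨h1, h2, h3, h4, h5, by simp, h6, fun i => opLE_refl _, le_refl _⟩
  | cons nb rest ih =>
      intro hn dist pq hlen hzero hpath hent hwit hud
      have hstep : Step edges u nb.1 nb.2 := hn nb List.mem_cons_self
      have hsb := step_bounds hE hstep
      have hw1 : 1 ≤ nb.1 := hsb.2.1.1
      have hw2 : nb.1 ≤ n := hsb.2.1.2
      have hc0 : 0 ≤ nb.2 := hsb.2.2
      rw [List.foldl_cons]
      by_cases himp : olt (some (d + nb.2)) (dget dist nb.1) = true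
      · rw [if_pos himp]
        -- u's witness path and its consequences
        obtain ⟨Pu, hwPu, hndPu, hwtPu, hpfxPu⟩ := hpath u d hu.1 hu.2 hud
        have hPu_bounds := isWalk_bounds hE hwPu hs
        have hwt0 : 0 ≤ d := hwtPu ▸ (path_wt_bounds hE hs hwPu hndPu).1
        -- the improved node is not on u's path (else its recorded value beats d + c)
        have hwnot : nb.1 ∉ s :: Pu.map Prod.fst := by
          intro hmem
          rcases List.mem_cons.mp hmem with heq | hmem
          · rw [heq] at himp
            rw [hzero] at himp
            simp [olt] at himp
            omega
          · obtain ⟨Q, R, hPuQR, hend⟩ := mem_fst_split (s := s) hmem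
            obtain ⟨z, hz, hzle⟩ := hpfxPu Q R hPuQR
            rw [hend] at hz
            rw [hz] at himp
            simp [olt] at himp
            have hRn : 0 ≤ wsum R :=
              wsum_nonneg (fun p hp => (hPu_bounds.2 p (hPuQR ▸ List.mem_append_right Q hp)).2)
            have : wsum Pu = wsum Q + wsum R := by rw [hPuQR, wsum_append]
            omega
        -- the extended witness path
        have hwPw : IsWalk edges s (Pu ++ [(nb.1, nb.2)]) nb.1 := isWalk_snoc_intro hwPu hstep
        have hndPw : (s :: (Pu ++ [(nb.1, nb.2)]).map Prod.fst).Nodup := by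
          have : s :: (Pu ++ [(nb.1, nb.2)]).map Prod.fst
              = (s :: Pu.map Prod.fst) ++ [nb.1] := by simp
          rw [this, List.nodup_append]
          refine ⟨hndPu, List.nodup_singleton _, fun a ha b hb => ?_⟩
          rw [List.mem_singleton] at hb
          subst hb
          exact fun hc => hwnot (hc ▸ ha)
        have hwtPw : wsum (Pu ++ [(nb.1, nb.2)]) = d + nb.2 := by
          rw [wsum_append, wsum_cons, wsum_nil, hwtPu]; ring
        have hnewb := path_wt_bounds hE hs hwPw hndPw
        have hnew0 : 0 ≤ d + nb.2 := hwtPw ▸ hnewb.1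
        have hnewM : d + nb.2 ≤ n * esum edges := hwtPw ▸ hnewb.2
        have hwlt : (nb.1).toNat < dist.length := by rw [hlen]; omega
        set dist1 := dset dist nb.1 (some (d + nb.2)) with hdist1
        set pq1 := hpush (d + nb.2, nb.1) pq with hpq1
        have mono1 : ∀ i, opLE (dget dist1 i) (dget dist i) := dset_olt_mono himp
        have hget1 : dget dist1 nb.1 = some (d + nb.2) := by
          rw [hdist1]; exact dget_dset_self (by omega) hwlt _
        have hne_u : (u).toNat ≠ (nb.1).toNat := by
          intro hc
          rw [← dget_congr_toNat (by omega) (by omega) hc, hud] at himp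
          simp [olt] at himp
          omega
        have hud1 : dget dist1 u = some d := by
          rw [hdist1, dget_dset_toNat_ne (by omega) (by omega) (fun hc => hne_u hc.symm) _]
          exact hud
        have hzero1 : dget dist1 s = some 0 := by
          have hns : (nb.1).toNat ≠ s.toNat := by
            intro hc
            exact hwnot (List.mem_cons.mpr (Or.inl (by omega)))
          rw [hdist1, dget_dset_toNat_ne (by omega) (by omega) hns _]
          exact hzero
        have hlen1 : dist1.length = (n + 1).toNat := by
          rw [hdist1, length_dset, hlen]
        -- prefix soundness of the new witness path at dist1
        have hpfxPw : PfxOk s dist1 (Pu ++ [(nb.1, nb.2)]) := by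
          intro Q R hQR
          rcases List.eq_nil_or_concat R with rfl | ⟨R', e, rfl⟩
          · rw [List.append_nil] at hQR
            subst hQR
            rw [endp_concat]
            exact ⟨d + nb.2, hget1, le_of_eq hwtPw.symm⟩
          · rw [List.concat_eq_append, ← List.append_assoc] at hQR
            obtain ⟨hQ, he⟩ := List.append_inj' hQR (by simp)
            obtain rfl : e = (nb.1, nb.2) := by simpa using he.symm
            obtain ⟨z, hz, hzle⟩ := hpfxPu Q R' hQ
            have hend_ne : 1 ≤ endp s Q ∧ (endp s Q).toNat ≠ (nb.1).toNat := by
              have hendmem : endp s Q = s ∨ endp s Q ∈ Q.map Prod.fst := endp_mem s Q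
              have hin : endp s Q ∈ s :: Pu.map Prod.fst := by
                rcases hendmem with h | h
                · rw [h]; exact List.mem_cons_self
                · exact List.mem_cons_of_mem _ (by
                    rw [hQ, List.map_append]
                    exact List.mem_append_left _ h)
              have hne : endp s Q ≠ nb.1 := fun hc => hwnot (hc ▸ hin)
              have hbnd : 1 ≤ endp s Q ∧ endp s Q ≤ n := by
                rcases List.mem_cons.mp hin with h | h
                · rw [h]; exact hs
                · obtain ⟨p, hp, hpe⟩ := List.mem_map.mp h
                  rw [← hpe]
                  exact (hPu_bounds.2 p hp).1
              exact ⟨hbnd.1, by omega⟩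
            rw [hdist1, dget_dset_toNat_ne (by omega) (by omega) (fun hc => hend_ne.2 hc.symm) _]
            exact ⟨z, hz, hzle⟩
        -- invariant clauses at (dist1, pq1)
        have hpath1 : ∀ v x, 1 ≤ v → v ≤ n → dget dist1 v = some x →
            ∃ P, IsWalk edges s P v ∧ (s :: P.map Prod.fst).Nodup ∧ wsum P = x ∧ PfxOk s dist1 P := by
          intro v x hv1 hv2 hx
          by_cases hvw : v.toNat = (nb.1).toNat
          · have hvv : v = nb.1 := by omega
            subst hvv
            rw [hget1] at hx
            obtain rfl : x = d + nb.2 := by injection hx.symm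
            exact ⟨Pu ++ [(nb.1, nb.2)], hwPw, hndPw, hwtPw, hpfxPw⟩
          · rw [hdist1, dget_dset_toNat_ne (by omega) (by omega) (fun hc => hvw hc.symm) _] at hx
            obtain ⟨P0, hw0, hnd0, hwt0', hpfx0⟩ := hpath v x hv1 hv2 hx
            exact ⟨P0, hw0, hnd0, hwt0', PfxOk_mono mono1 hpfx0⟩
        have hent1 : ∀ p ∈ pq1, 1 ≤ p.2 ∧ p.2 ≤ n ∧ ∃ x, dget dist1 p.2 = some x ∧ x ≤ p.1 := by
          intro p hp
          rcases (mem_hpush _ p pq).mp hp with rfl | hp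
          · exact ⟨hw1, hw2, d + nb.2, hget1, le_refl _⟩
          · obtain ⟨hb1, hb2, x0, hx0, hle0⟩ := hent p hp
            obtain ⟨x1, hx1, hle1⟩ := mono1 p.2 x0 hx0
            exact ⟨hb1, hb2, x1, hx1, le_trans hle1 hle0⟩
        have hwit1 : ∀ v x, 1 ≤ v → v ≤ n → dget dist1 v = some x →
            (x, v) ∈ pq1 ∨ (∀ w c, Step edges v w c → ∃ y, dget dist1 w = some y ∧ y ≤ x + c) ∨
            (v = u ∧ x = d) := by
          intro v x hv1 hv2 hx
          by_cases hvw : v.toNat = (nb.1).toNat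
          · have hvv : v = nb.1 := by omega
            subst hvv
            rw [hget1] at hx
            obtain rfl : x = d + nb.2 := by injection hx.symm
            exact Or.inl ((mem_hpush _ _ pq).mpr (Or.inl rfl))
          · rw [hdist1, dget_dset_toNat_ne (by omega) (by omega) (fun hc => hvw hc.symm) _] at hx
            rcases hwit v x hv1 hv2 hx with hmem | hall | hthird
            · exact Or.inl ((mem_hpush _ _ pq).mpr (Or.inr hmem))
            · refine Or.inr (Or.inl ?_)
              intro w' c' hst'
              obtain ⟨y, hy, hyle⟩ := hall w' c' hst'
              obtain ⟨y', hy', hle'⟩ := mono1 w' y hy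
              exact ⟨y', hy', by omega⟩
            · exact Or.inr (Or.inr hthird)
        -- potential strictly absorbs the pushed entry
        have hmeas1 : PhiL (n * esum edges).toNat dist1 + pq1.length ≤
            PhiL (n * esum edges).toNat dist + pq.length := by
          have heq := PhiL_dset (n * esum edges).toNat (by omega) hwlt (some (d + nb.2))
          have hlt : phiB (n * esum edges).toNat (some (d + nb.2)) <
              phiB (n * esum edges).toNat (dget dist nb.1) := by
            cases hold : dget dist nb.1 with
            | none => simp [phiB]; omega
            | some z =>
                have hzlt : d + nb.2 < z := by
                  rw [hold] at himp; simpa [olt] using himp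
                have hz0 : 0 ≤ z := by
                  obtain ⟨P0, hw0, hnd0, hwt0', _⟩ := hpath nb.1 z hw1 hw2 hold
                  exact hwt0' ▸ (path_wt_bounds hE hs hw0 hnd0).1
                simp [phiB]; omega
          rw [hpq1, length_hpush]
          have : PhiL (n * esum edges).toNat dist1 + phiB (n * esum edges).toNat (dget dist nb.1)
              = PhiL (n * esum edges).toNat dist + phiB (n * esum edges).toNat (some (d + nb.2)) := heq
          omega
        obtain ⟨r1, r2, r3, r4, r5, r6, r7, r8, r9⟩ :=
          ih (fun nb' h' => hn nb' (List.mem_cons_of_mem _ h')) dist1 pq1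
            hlen1 hzero1 hpath1 hent1 hwit1 hud1
        refine ⟨r1, r2, r3, r4, r5, ?_, r7, fun i => opLE_trans (r8 i) (mono1 i), by omega⟩
        intro nb' hnb'
        rcases List.mem_cons.mp hnb' with rfl | hnb'
        · obtain ⟨y, hy, hyle⟩ := r8 nb'.1 (d + nb'.2) hget1
          exact ⟨y, hy, hyle⟩
        · exact r6 nb' hnb'
      · rw [if_neg himp]
        obtain ⟨r1, r2, r3, r4, r5, r6, r7, r8, r9⟩ :=
          ih (fun nb' h' => hn nb' (List.mem_cons_of_mem _ h')) dist pq
            hlen hzero hpath hent hwit hud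
        refine ⟨r1, r2, r3, r4, r5, ?_, r7, r8, r9⟩
        intro nb' hnb'
        rcases List.mem_cons.mp hnb' with rfl | hnb'
        · have hfalse : olt (some (d + nb'.2)) (dget dist nb'.1) = false := by
            rw [← Bool.not_eq_true]; exact himp
          obtain ⟨y0, hy0, hle0⟩ := opLE_of_olt_false hfalse (d + nb'.2) rfl
          obtain ⟨y1, hy1, hle1⟩ := r8 nb'.1 y0 hy0
          exact ⟨y1, hy1, by omega⟩
        · exact r6 nb' hnb'

lemma dij_loop_run {n s : Int} {edges : List (Int × Int × Int)} (hE : EOK n edges)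
    (hs : 1 ≤ s ∧ s ≤ n) :
    ∀ (fuel : Nat) (dist : List (Option Int)) (pq : List (Int × Int)),
      DInv n s edges dist pq →
      PhiL (n * esum edges).toNat dist + pq.length < fuel →
      DInv n s edges (dijLoop (buildGraph n edges) fuel dist pq) [] := by
  intro fuel
  induction fuel with
  | zero => intro dist pq _ h; omega
  | succ fuel ih =>
      intro dist pq hInv hfu
      rcases pq with _ | ⟨⟨d, u⟩, tail⟩
      · exact hInv
      · obtain ⟨hb1, hb2, x, hx, hxle⟩ := hInv.ent (d, u) List.mem_cons_self
        by_cases hskip : olt (dget dist u) (some d) = true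
        · rw [dijLoop, if_pos hskip]
          apply ih
          · refine ⟨hInv.len, hInv.zero, hInv.path,
              fun p hp => hInv.ent p (List.mem_cons_of_mem _ hp), ?_⟩
            intro v y hv1 hv2 hy
            rcases hInv.wit v y hv1 hv2 hy with hmem | hall
            · rcases List.mem_cons.mp hmem with heq | hmem
              · exfalso
                injection heq with h1 h2
                subst h1; subst h2
                rw [hy] at hskip
                simp [olt] at hskip
              · exact Or.inl hmem
            · exact Or.inr hall
          · simp only [List.length_cons] at hfu
            omega
        · rw [dijLoop, if_neg hskip]
          have hxd : x = d := by
            rw [hx] at hskip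
            simp [olt] at hskip
            omega
          have hud : dget dist u = some d := by rw [hx, hxd]
          have hn : ∀ nb ∈ (buildGraph n edges).getD u [], Step edges u nb.1 nb.2 := by
            intro nb hnb
            exact (mem_graph (n := n) edges u nb.1 nb.2).mp hnb
          have hwit' : ∀ v y, 1 ≤ v → v ≤ n → dget dist v = some y →
              (y, v) ∈ tail ∨ (∀ w c, Step edges v w c → ∃ z, dget dist w = some z ∧ z ≤ y + c) ∨
              (v = u ∧ y = d) := by
            intro v y hv1 hv2 hy
            rcases hInv.wit v y hv1 hv2 hy with hmem | hall
            · rcases List.mem_cons.mp hmem with heq | hmem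
              · injection heq with h1 h2
                exact Or.inr (Or.inr ⟨h2, h1⟩)
              · exact Or.inl hmem
            · exact Or.inr (Or.inl hall)
          obtain ⟨r1, r2, r3, r4, r5, r6, r7, r8, r9⟩ :=
            dij_relax_fold hE hs ⟨hb1, hb2⟩ ((buildGraph n edges).getD u []) hn dist tail
              hInv.len hInv.zero hInv.path
              (fun p hp => hInv.ent p (List.mem_cons_of_mem _ hp)) hwit' hud
          apply ih
          · refine ⟨r1, r2, r3, r4, ?_⟩
            intro v y hv1 hv2 hy
            rcases r5 v y hv1 hv2 hy with hmem | hall | ⟨hvu, hyd⟩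
            · exact Or.inl hmem
            · exact Or.inr hall
            · refine Or.inr ?_
              intro w' c' hst'
              rw [hvu] at hst'
              have hmemg : (w', c') ∈ (buildGraph n edges).getD u [] :=
                (mem_graph (n := n) edges u w' c').mpr hst'
              obtain ⟨y', hy', hle'⟩ := r6 (w', c') hmemg
              exact ⟨y', hy', by omega⟩
          · simp only [List.length_cons] at hfu
            omega

lemma dij_final {n s : Int} {edges : List (Int × Int × Int)} (hE : EOK n edges)
    (hs : 1 ≤ s ∧ s ≤ n) :
    DInv n s edges (dijkstra n edges (buildGraph n edges) s) [] := by
  have hzero : dget (dset (List.replicate (n + 1).toNat none) s (some 0)) s = some 0 :=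
    bfInit_get_s hs
  unfold dijkstra
  apply dij_loop_run hE hs
  · refine ⟨by simp [length_dset], hzero, ?_, ?_, ?_⟩
    · intro v x hv1 hv2 hx
      obtain ⟨rfl, rfl⟩ := bfInit_get_eq hs ⟨hv1, hv2⟩ hx
      refine ⟨[], rfl, by simp, rfl, ?_⟩
      intro Q R hQR
      obtain ⟨rfl, rfl⟩ : Q = [] ∧ R = [] := by
        have := List.append_eq_nil_iff.mp hQR.symm
        exact this
      exact ⟨0, hzero, le_refl 0⟩
    · intro p hp
      rw [List.mem_singleton] at hp
      subst hp
      exact ⟨hs.1, hs.2, 0, hzero, le_refl 0⟩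
    · intro v x hv1 hv2 hx
      obtain ⟨rfl, rfl⟩ := bfInit_get_eq hs ⟨hv1, hv2⟩ hx
      exact Or.inl (List.mem_singleton.mpr rfl)
  · have heq := PhiL_dset (n * esum edges).toNat
      (l := List.replicate (n + 1).toNat none) (i := s) (by omega) (by simp; omega) (some 0)
    have heq' : PhiL (n * esum edges).toNat
        (dset (List.replicate (n + 1).toNat none) s (some 0)) + ((n * esum edges).toNat + 1)
        = (n + 1).toNat * ((n * esum edges).toNat + 1) := by
      simpa [phiB, dget_replicate, PhiL_replicate] using heq
    have h1 : PhiL (n * esum edges).toNat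
        (dset (List.replicate (n + 1).toNat none) s (some 0))
        ≤ (n + 1).toNat * ((n * esum edges).toNat + 1) := Nat.le.intro heq'
    unfold dijFuel
    simp only [List.length_cons, List.length_nil]
    calc (PhiL (n * esum edges).toNat
          (dset (List.replicate (n + 1).toNat none) s (some 0))) + (0 + 1)
        ≤ (n + 1).toNat * ((n * esum edges).toNat + 1) + 1 := by omega
      _ ≤ (n + 1).toNat * ((n * esum edges).toNat + 2) + 1 :=
          Nat.add_le_add_right (Nat.mul_le_mul_left _ (Nat.le_succ _)) 1
      _ < (n + 1).toNat * ((n * esum edges).toNat + 2) + 2 := Nat.lt_succ_self _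

lemma DInv_FP {n s : Int} {edges : List (Int × Int × Int)} (hE : EOK n edges)
    {dist : List (Option Int)} (h : DInv n s edges dist []) : FP edges s dist := by
  refine ⟨h.zero, ?_⟩
  intro u v c hst x hx
  have hb := step_bounds hE hst
  rcases h.wit u x hb.1.1 hb.1.2 hx with hmem | hall
  · cases hmem
  · exact hall v c hst

lemma dij_eq_bf {n : Int} {edges : List (Int × Int × Int)} (hE : EOK n edges)
    {s : Int} (hs : 1 ≤ s ∧ s ≤ n) (v : Int) (hv : 1 ≤ v ∧ v ≤ n) :
    dget (dijkstra n edges (buildGraph n edges) s) v = dget (bellmanFord n edges s) v := by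
  have hinv := dij_final hE hs
  have hFP := DInv_FP hE hinv
  unfold bellmanFord
  apply opLE_antisymm
  · intro b hb
    obtain ⟨P, hw, rfl⟩ := bf_lower hE hs n.toNat v b hv.1 hv.2 hb
    obtain ⟨x, hx, hxle⟩ := fp_walk hFP P s v 0 hFP.1 hw
    exact ⟨x, hx, by omega⟩
  · intro b hb
    obtain ⟨P, hw, hnd, hwt, _⟩ := hinv.path v b hv.1 hv.2 hb
    have hlenP : P.length ≤ n.toNat := by
      have hmem : ∀ x ∈ s :: P.map Prod.fst, 1 ≤ x ∧ x ≤ n := by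
        intro x hx
        rcases List.mem_cons.mp hx with rfl | hx
        · exact hs
        · obtain ⟨p, hp, hpe⟩ := List.mem_map.mp hx
          rw [← hpe]
          exact ((isWalk_bounds hE hw hs).2 p hp).1
      have := nodup_length_le hnd hmem
      simp at this
      omega
    obtain ⟨a, ha, hale⟩ := bf_upper hE hs n.toNat P v hw hlenP (wsum P) rfl
    exact ⟨a, ha, by omega⟩

lemma argmin_fold (tA tB : Int → Option Int) (b : Int)
    (htot : ∀ r, 1 ≤ r → r < b → tA r = tB r) :
    ∀ (a : Int) (st : Option Int × Int), 1 ≤ a → st.2 < a →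
      ((PySem.List.pyRange a b 1).foldl
        (fun st room => if olt (tA room) st.1 then (tA room, room)
          else if oeq (tA room) st.1 then (st.1, min st.2 room) else st) st)
      = ((PySem.List.pyRange a b 1).foldl
        (fun st room => if olt (tB room) st.1 then (tB room, room) else st) st) := by
  suffices h : ∀ (k : Nat) (a : Int) (st : Option Int × Int), (b - a).toNat ≤ k → 1 ≤ a →
      st.2 < a →
      ((PySem.List.pyRange a b 1).foldl
        (fun st room => if olt (tA room) st.1 then (tA room, room)
          else if oeq (tA room) st.1 then (st.1, min st.2 room) else st) st)
      = ((PySem.List.pyRange a b 1).foldl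
        (fun st room => if olt (tB room) st.1 then (tB room, room) else st) st) by
    intro a st h1 h2
    exact h (b - a).toNat a st le_rfl h1 h2
  intro k
  induction k with
  | zero =>
      intro a st hk h1 h2
      rw [PySem.List.pyRange_one_eq_nil (by omega)]
      rfl
  | succ k ihk =>
      intro a st hk h1 h2
      by_cases hab : a < b
      · rw [PySem.List.pyRange_one_cons hab]
        simp only [List.foldl_cons]
        have htr := htot a h1 hab
        by_cases hlt : olt (tA a) st.1 = true
        · rw [if_pos hlt, if_pos (htr ▸ hlt), htr]
          exact ihk (a + 1) (tB a, a) (by omega) (by omega) (by simp)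
        · rw [if_neg hlt, if_neg (fun hc => hlt (htr ▸ hc))]
          by_cases heq2 : oeq (tA a) st.1 = true
          · rw [if_pos heq2]
            have hmin : min st.2 a = st.2 := min_eq_left (le_of_lt h2)
            rw [hmin]
            exact ihk (a + 1) st (by omega) (by omega) (by omega)
          · rw [if_neg heq2]
            exact ihk (a + 1) st (by omega) (by omega) (by omega)
      · rw [PySem.List.pyRange_one_eq_nil (by omega)]
        rfl
-- ===== VERDICT (by name: the statement is the Claim_ definition above) =====
theorem find_best_meeting_room_spec : Claim_equal_find_best_meeting_room := by
  unfold Claim_equal_find_best_meeting_room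
  intro n m edges k friends hdom hpre
  unfold Spec_find_best_meeting_room
  obtain ⟨hE, hF⟩ := hpre
  have htot : ∀ r, 1 ≤ r → r < n + 1 →
      (friends.map (fun f => dijkstra n edges (buildGraph n edges) f)).foldl
        (fun acc dv => oaddO acc (dget dv r)) (some 0)
      = (friends.map (fun f => bellmanFord n edges f)).foldl
        (fun acc dv => oaddO acc (dget dv r)) (some 0) := by
    intro r h1 h2
    rw [List.foldl_map, List.foldl_map]
    apply PySem.List.foldl_congr_mem
    intro acc f hf
    rw [dij_eq_bf hE (hF f hf) r ⟨h1, by omega⟩]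
  have key := argmin_fold
    (fun r => (friends.map (fun f => dijkstra n edges (buildGraph n edges) f)).foldl
      (fun acc dv => oaddO acc (dget dv r)) (some 0))
    (fun r => (friends.map (fun f => bellmanFord n edges f)).foldl
      (fun acc dv => oaddO acc (dget dv r)) (some 0))
    (n + 1) htot 1 (none, -1) le_rfl (by norm_num)
  exact congrArg Prod.snd key
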